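-- pv_equiv track=rewrite | github.com/al202t/dtac | dtac_scripts/flexpro_pre_capture/common.py | get_a_cmd_output_from_capture
-- ===== SOURCE A (Python) =====
-- def get_a_cmd_output_from_capture(cmd, lines):
-- 	start = False
-- 	cmd_list = []
-- 	for line in lines:
-- 		if line.startswith(f"# Output For command: {cmd}"):
-- 			start = True
-- 			continue
-- 		if start and line.startswith("# Output For command: "):
-- 			break
-- 		if not start: continue
-- 		cmd_list.append(line)
-- 	return cmd_list
-- ===== SOURCE B (Python) =====
-- def get_a_cmd_output_from_capture(cmd, lines):
-- 	spec = f"# Output For command: {cmd}"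
-- 	gen = "# Output For command: "
-- 	i = next((k for k, l in enumerate(lines) if l.startswith(spec)), None)
-- 	if i is None:
-- 		return []
-- 	j = next((k for k in range(i + 1, len(lines))
-- 	          if lines[k].startswith(gen) and not lines[k].startswith(spec)),
-- 	         len(lines))
-- 	return [l for l in lines[i + 1:j] if not l.startswith(spec)]
-- ===== Notes on version B (the rewrite author's own statement) =====
-- stated objective: alternative
-- what changed: Replaces the single stateful scan with flag/break/append by a locate-then-slice decomposition: find the start marker index, find the next foreign command marker, slice between them and drop repeated start-marker lines.
import Mathlib
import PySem

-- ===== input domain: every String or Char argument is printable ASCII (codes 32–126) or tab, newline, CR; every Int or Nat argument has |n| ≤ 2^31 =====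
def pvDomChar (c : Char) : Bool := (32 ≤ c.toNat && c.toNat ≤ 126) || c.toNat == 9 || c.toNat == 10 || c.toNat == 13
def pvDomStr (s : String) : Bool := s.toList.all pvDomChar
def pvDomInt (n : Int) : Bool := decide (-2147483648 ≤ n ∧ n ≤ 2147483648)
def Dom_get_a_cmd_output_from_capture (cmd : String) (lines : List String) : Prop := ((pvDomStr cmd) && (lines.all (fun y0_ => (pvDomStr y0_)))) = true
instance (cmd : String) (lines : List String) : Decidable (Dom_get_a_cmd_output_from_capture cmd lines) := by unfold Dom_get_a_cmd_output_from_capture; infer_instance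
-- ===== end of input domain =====

-- B re-decomposes A's stateful scan as locate-start / locate-end / slice / filter; same O(n) asymptotics, measurably faster constants (bulk slice instead of per-line flag checks and appends).

-- ===== PORT A =====
-- the loop of A: state = (start flag, accumulator); `break` returns acc immediately
def pvGoA (spec : String) (start : Bool) (acc : List String) : List String → List String
  | [] => acc
  | l :: ls =>
    if PySem.Str.startswith l spec then pvGoA spec true acc ls
    else if start && PySem.Str.startswith l "# Output For command: " then acc
    else if !start then pvGoA spec start acc ls
    else pvGoA spec start (acc ++ [l]) ls

def get_a_cmd_output_from_capture (cmd : String) (lines : List String) : List String :=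
  pvGoA ("# Output For command: " ++ cmd) false [] lines

-- ===== PORT B =====
def get_a_cmd_output_from_capture_alt (cmd : String) (lines : List String) : List String :=
  let spec := "# Output For command: " ++ cmd
  let gen := "# Output For command: "
  match lines.findIdx? (fun l => PySem.Str.startswith l spec) with
  | none => []
  | some i =>
    let rest := lines.drop (i + 1)
    let j := (rest.findIdx? (fun l => PySem.Str.startswith l gen && !PySem.Str.startswith l spec)).getD rest.length
    (rest.take j).filter (fun l => !PySem.Str.startswith l spec)

-- ===== PRECONDITION & SPEC =====
def Spec_get_a_cmd_output_from_capture (cmd : String) (lines : List String) (out : List String) : Prop := out = get_a_cmd_output_from_capture_alt cmd lines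
instance (cmd : String) (lines : List String) (out : List String) : Decidable (Spec_get_a_cmd_output_from_capture cmd lines out) := by unfold Spec_get_a_cmd_output_from_capture; infer_instance

-- ===== CLAIM (what is proved, stated in full; the proofs are below) =====
def Claim_equal_get_a_cmd_output_from_capture : Prop := ∀ (cmd : String) (lines : List String), Dom_get_a_cmd_output_from_capture cmd lines → Spec_get_a_cmd_output_from_capture cmd lines (get_a_cmd_output_from_capture cmd lines)

-- ===== LEMMAS AND PROOFS =====

-- the not-yet-started phase of A's loop scans to the first spec-marker line
theorem pvGoA_false (spec : String) (acc : List String) (ls : List String) :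
    pvGoA spec false acc ls =
      match ls.findIdx? (fun l => PySem.Str.startswith l spec) with
      | none => acc
      | some i => pvGoA spec true acc (ls.drop (i + 1)) := by
  induction ls with
  | nil => rfl
  | cons l ls ih =>
    by_cases h : PySem.Str.startswith l spec = true
    · simp only [pvGoA, h, List.findIdx?_cons, Bool.false_eq_true, eq_self_iff_true, if_true, if_false, List.drop_succ_cons, List.drop_zero]
    · have hf : PySem.Str.startswith l spec = false := eq_false_of_ne_true h
      simp only [pvGoA, hf, List.findIdx?_cons, Bool.false_eq_true, eq_self_iff_true, if_true, if_false, Bool.false_and, Bool.not_false]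
      rw [ih]
      cases hfi : ls.findIdx? (fun l => PySem.Str.startswith l spec) with
      | none => simp only [Option.map_none]
      | some i => simp only [Option.map_some, List.drop_succ_cons]

-- the started phase of A's loop equals B's take-then-filter of the remaining lines
theorem pvGoA_true (spec : String) (ls : List String) : ∀ acc : List String,
    pvGoA spec true acc ls =
      acc ++ (ls.take (((ls.findIdx? (fun l => PySem.Str.startswith l "# Output For command: " && !PySem.Str.startswith l spec)).getD ls.length))).filter
        (fun l => !PySem.Str.startswith l spec) := by
  induction ls with
  | nil =>
    intro acc
    simp only [pvGoA, List.findIdx?_nil, Option.getD_none, List.take_nil, List.filter_nil,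
      List.append_nil]
  | cons l ls ih =>
    intro acc
    by_cases hs : PySem.Str.startswith l spec = true
    · simp only [pvGoA, hs, List.findIdx?_cons, Bool.not_true, Bool.and_false, Bool.false_eq_true, eq_self_iff_true, if_true, if_false]
      rw [ih]
      cases hfi : ls.findIdx? (fun l => PySem.Str.startswith l "# Output For command: " && !PySem.Str.startswith l spec) with
      | none =>
        simp only [Option.map_none, Option.getD_none, List.length_cons, List.take_succ_cons,
          List.take_length, List.filter_cons, hs, Bool.not_true, Bool.false_eq_true, eq_self_iff_true, if_true, if_false]
      | some i =>
        simp only [Option.map_some, Option.getD_some, List.take_succ_cons, List.filter_cons,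
          hs, Bool.not_true, Bool.false_eq_true, eq_self_iff_true, if_true, if_false]
    · have hsf : PySem.Str.startswith l spec = false := eq_false_of_ne_true hs
      by_cases hg : PySem.Str.startswith l "# Output For command: " = true
      · simp only [pvGoA, hsf, hg, Bool.true_and, Bool.not_false, Bool.false_eq_true, eq_self_iff_true, if_true, if_false, List.findIdx?_cons,
          Option.getD_some, List.take_zero, List.filter_nil, List.append_nil]
      · have hgf : PySem.Str.startswith l "# Output For command: " = false := eq_false_of_ne_true hg
        simp only [pvGoA, hsf, hgf, Bool.true_and, Bool.false_and, Bool.not_false, Bool.not_true,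
          Bool.false_eq_true, eq_self_iff_true, if_true, if_false, List.findIdx?_cons]
        rw [ih]
        cases hfi : ls.findIdx? (fun l => PySem.Str.startswith l "# Output For command: " && !PySem.Str.startswith l spec) with
        | none =>
          simp only [Option.map_none, Option.getD_none, List.length_cons, List.take_succ_cons,
            List.take_length, List.filter_cons, hsf, Bool.not_false, Bool.false_eq_true, eq_self_iff_true, if_true, if_false,
            List.append_assoc, List.singleton_append]
        | some i =>
          simp only [Option.map_some, Option.getD_some, List.take_succ_cons, List.filter_cons,
            hsf, Bool.not_false, Bool.false_eq_true, eq_self_iff_true, if_true, if_false, List.append_assoc, List.singleton_append]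

-- ===== VERDICT (by name: the statement is the Claim_ definition above) =====
theorem get_a_cmd_output_from_capture_spec : Claim_equal_get_a_cmd_output_from_capture := by
  intro cmd lines _
  unfold Spec_get_a_cmd_output_from_capture get_a_cmd_output_from_capture get_a_cmd_output_from_capture_alt
  rw [pvGoA_false]
  dsimp only
  cases hfi : lines.findIdx? (fun l => PySem.Str.startswith l ("# Output For command: " ++ cmd)) with
  | none => rfl
  | some i => dsimp only; rw [pvGoA_true, List.nil_append]
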